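-- pv_equiv track=rewrite | github.com/JiwenXu66/PSI-TL | First.Layer/FunctionOne.py | Molecular_Weight_19
-- ===== SOURCE A (Python) =====
-- def Molecular_Weight_19(seq):
--     class1 = ('A','G','S'); class2 = ('C','D','E','H','I','K','L','M','N','Q','P','T','V'); class3 = ('F','R','W','Y')
--     ca_map = { char: 1 for char in class1 } #设置映射字典，并完成class1的映射
--     for char in class2:
--         ca_map[char] = 2
--     for char in class3:
--         ca_map[char] = 3
--     transformed_seq = ''.join(str(ca_map.get(char, '?')) for char in seq)
--     return transformed_seq
-- ===== SOURCE B (Python) =====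
-- def Molecular_Weight_19(seq):
--     # Scatter strategy: start from a buffer of '?' markers and, for each of the
--     # 20 classified residues, overwrite every position where it occurs with its
--     # class digit.  Outer loop over the (constant) alphabet, inner over seq.
--     out = ['?'] * len(seq)
--     for digit, group in (('1', 'AGS'), ('2', 'CDEHIKLMNQPTV'), ('3', 'FRWY')):
--         for ch in group:
--             for i, c in enumerate(seq):
--                 if c == ch:
--                     out[i] = digit
--     return ''.join(out)
-- ===== Notes on version B (the rewrite author's own statement) =====
-- stated objective: alternative
-- what changed: Inverts the traversal: instead of one pass over seq looking each residue up in a precomputed dict, B starts from a buffer of placeholder marks and scatters each of the 20 classified residues' digits over the positions where that residue occurs (outer loop over the constant alphabet, inner scan of seq).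
import Mathlib
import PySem

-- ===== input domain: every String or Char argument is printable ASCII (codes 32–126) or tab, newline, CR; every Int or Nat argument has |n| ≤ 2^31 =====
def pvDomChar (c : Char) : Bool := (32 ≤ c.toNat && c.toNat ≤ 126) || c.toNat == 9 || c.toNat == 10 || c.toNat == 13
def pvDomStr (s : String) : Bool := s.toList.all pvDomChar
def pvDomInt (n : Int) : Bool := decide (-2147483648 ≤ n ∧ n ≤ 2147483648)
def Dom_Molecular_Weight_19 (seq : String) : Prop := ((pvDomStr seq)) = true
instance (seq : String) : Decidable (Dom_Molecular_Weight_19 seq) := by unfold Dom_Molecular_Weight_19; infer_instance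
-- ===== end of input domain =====

-- B inverts A's traversal: instead of one pass looking each residue up in a precomputed
-- dict, it scatters each classified residue's digit over a buffer of placeholder marks
-- (outer loop over the 20-letter alphabet, inner scan of seq); objective: alternative.

-- ===== PORT A =====
-- ca_map built as in A: dict comprehension over class1, then the two insert loops
def mwA_caMap : PySem.Dict Char Int :=
  let m := (['A','G','S'] : List Char).foldl (fun d c => d.insert c 1) PySem.Dict.empty
  let m := (['C','D','E','H','I','K','L','M','N','Q','P','T','V'] : List Char).foldl (fun d c => d.insert c 2) m
  (['F','R','W','Y'] : List Char).foldl (fun d c => d.insert c 3) m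

def Molecular_Weight_19 (seq : String) : String :=
  PySem.Str.join "" (seq.toList.map (fun c =>
    match mwA_caMap.get? c with
    | some n => PySem.Int.toStr n
    | none => "?"))

-- ===== PORT B =====
-- the three (digit, residue-group) pairs B iterates over
def mwB_groups : List (Char × List Char) :=
  [('1', ['A','G','S']),
   ('2', ['C','D','E','H','I','K','L','M','N','Q','P','T','V']),
   ('3', ['F','R','W','Y'])]

-- the inner "for i, c in enumerate(seq): if c == ch: out[i] = digit" scan
def mwB_scatter (xs : List Char) (out : List Char) (ch : Char) (dg : Char) : List Char :=
  (PySem.List.enumerate xs 0).foldl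
    (fun o ic => if ic.2 == ch then PySem.List.pySetD o ic.1 dg else o) out

def Molecular_Weight_19_alt (seq : String) : String :=
  let xs := seq.toList
  let out := xs.map (fun _ => '?')
  String.ofList (mwB_groups.foldl
    (fun o p => p.2.foldl (fun o ch => mwB_scatter xs o ch p.1) o) out)

-- ===== PRECONDITION & SPEC =====
def Spec_Molecular_Weight_19 (seq : String) (out : String) : Prop := out = Molecular_Weight_19_alt seq
instance (seq : String) (out : String) : Decidable (Spec_Molecular_Weight_19 seq out) := by unfold Spec_Molecular_Weight_19; infer_instance

-- ===== CLAIM (what is proved, stated in full; the proofs are below) =====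
def Claim_equal_Molecular_Weight_19 : Prop := ∀ (seq : String), Dom_Molecular_Weight_19 seq → Spec_Molecular_Weight_19 seq (Molecular_Weight_19 seq)

-- ===== LEMMAS AND PROOFS =====
-- the 20 scatter passes of B, flattened in execution order
def mwPasses : List (Char × Char) :=
  [('A','1'),('G','1'),('S','1'),
   ('C','2'),('D','2'),('E','2'),('H','2'),('I','2'),('K','2'),('L','2'),
   ('M','2'),('N','2'),('Q','2'),('P','2'),('T','2'),('V','2'),
   ('F','3'),('R','3'),('W','3'),('Y','3')]

-- one scatter pass, started at offset pre.length, rewrites exactly the middle segment pointwise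
lemma mw_scatter_aux (ch dg : Char) :
    ∀ (xs pre mid post : List Char), mid.length = xs.length →
    (PySem.List.enumerate xs (pre.length : Int)).foldl
      (fun o ic => if ic.2 == ch then PySem.List.pySetD o ic.1 dg else o) (pre ++ mid ++ post)
    = pre ++ List.zipWith (fun c o => if c == ch then dg else o) xs mid ++ post := by
  intro xs
  induction xs with
  | nil =>
    intro pre mid post h
    have hm : mid = [] := by simpa using h
    subst hm
    simp [PySem.List.enumerate_nil]
  | cons x t ih =>
    intro pre mid post h
    cases mid with
    | nil => simp at h
    | cons m mid' =>
      simp only [PySem.List.enumerate_cons, List.foldl_cons]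
      have hset : (if x == ch then
            PySem.List.pySetD (pre ++ (m :: mid') ++ post) (pre.length : Int) dg
          else pre ++ (m :: mid') ++ post)
          = pre ++ ((if x == ch then dg else m) :: mid') ++ post := by
        by_cases hx : x == ch
        · simp [hx, PySem.List.pySetD_natCast, List.append_assoc]
        · simp [hx]
      rw [hset]
      have hlen : ((pre.length : Int) + 1) = (((pre ++ [(if x == ch then dg else m)]).length : Nat) : Int) := by
        simp
      have hre : pre ++ ((if x == ch then dg else m) :: mid') ++ post
          = (pre ++ [(if x == ch then dg else m)]) ++ mid' ++ post := by
        simp [List.append_assoc]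
      rw [hlen, hre, ih (pre ++ [(if x == ch then dg else m)]) mid' post (by simpa using h)]
      simp [List.append_assoc]

lemma mw_scatter_eq (xs out : List Char) (ch dg : Char) (h : out.length = xs.length) :
    mwB_scatter xs out ch dg = List.zipWith (fun c o => if c == ch then dg else o) xs out := by
  have := mw_scatter_aux ch dg xs [] out [] h
  simpa [mwB_scatter] using this

-- a sequence of scatter passes over a mapped buffer is a single map
lemma mw_passes_eq (xs : List Char) :
    ∀ (ps : List (Char × Char)) (h : Char → Char),
    ps.foldl (fun out p => mwB_scatter xs out p.1 p.2) (xs.map h)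
    = xs.map (fun c => ps.foldl (fun v p => if c == p.1 then p.2 else v) (h c)) := by
  intro ps
  induction ps with
  | nil => intro h; simp
  | cons p ps ih =>
    intro h
    simp only [List.foldl_cons]
    rw [mw_scatter_eq xs (xs.map h) p.1 p.2 (by simp),
      List.zipWith_map_right, List.zipWith_self, ih]

-- B's nested group/letter folds are exactly the flattened 20 passes
lemma mw_groups_flat (xs out : List Char) :
    mwB_groups.foldl (fun o p => p.2.foldl (fun o ch => mwB_scatter xs o ch p.1) o) out
    = mwPasses.foldl (fun out p => mwB_scatter xs out p.1 p.2) out := by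
  simp [mwB_groups, mwPasses, List.foldl]

-- per-character agreement between A's dict lookup and B's pass fold
lemma mw_char_eq (c : Char) :
    (match mwA_caMap.get? c with
     | some n => PySem.Int.toStr n
     | none => "?")
    = String.ofList [mwPasses.foldl (fun v p => if c == p.1 then p.2 else v) '?'] := by
  have h : mwA_caMap = PySem.Dict.mk
      [('A',1),('G',1),('S',1),('C',2),('D',2),('E',2),('H',2),('I',2),('K',2),
       ('L',2),('M',2),('N',2),('Q',2),('P',2),('T',2),('V',2),('F',3),('R',3),
       ('W',3),('Y',3)] := by decide
  by_cases hc : c ∈ (['A','G','S','C','D','E','H','I','K','L','M','N','Q','P','T','V','F','R','W','Y'] : List Char)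
  · fin_cases hc <;> decide
  · simp only [List.mem_cons, List.not_mem_nil, not_or, or_false] at hc
    obtain ⟨h1,h2,h3,h4,h5,h6,h7,h8,h9,h10,h11,h12,h13,h14,h15,h16,h17,h18,h19,h20⟩ := hc
    simp [h, mwPasses, List.foldl, PySem.Dict.get?,
      h1, h2, h3, h4, h5, h6, h7, h8, h9, h10, h11, h12, h13, h14, h15, h16, h17, h18, h19, h20,
      Ne.symm h1, Ne.symm h2, Ne.symm h3, Ne.symm h4, Ne.symm h5, Ne.symm h6, Ne.symm h7,
      Ne.symm h8, Ne.symm h9, Ne.symm h10, Ne.symm h11, Ne.symm h12, Ne.symm h13, Ne.symm h14,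
      Ne.symm h15, Ne.symm h16, Ne.symm h17, Ne.symm h18, Ne.symm h19, Ne.symm h20]

-- ''.join over single-character strings is String.ofList of the mapped characters
lemma mw_join_singletons (xs : List Char) (f : Char → Char) :
    PySem.Str.join "" (xs.map (fun c => String.ofList [f c])) = String.ofList (xs.map f) := by
  have hl : (PySem.Str.join "" (xs.map (fun c => String.ofList [f c]))).toList = xs.map f := by
    rw [PySem.Str.toList_join]
    simp only [List.map_map]
    have h2 : (String.toList ∘ fun c => String.ofList [f c]) = fun c => [f c] := by
      funext c; exact String.toList_ofList
    rw [h2]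
    have h3 := PySem.Chars.join_nil_singletons (xs.map f)
    rw [List.map_map] at h3
    simpa [Function.comp_def] using h3
  rw [← hl]
  exact String.ofList_toList.symm

-- ===== VERDICT (by name: the statement is the Claim_ definition above) =====
theorem Molecular_Weight_19_spec : Claim_equal_Molecular_Weight_19 := by
  intro seq _
  unfold Spec_Molecular_Weight_19 Molecular_Weight_19 Molecular_Weight_19_alt
  rw [List.map_congr_left (fun c _ => mw_char_eq c)]
  rw [mw_join_singletons]
  simp only [mw_groups_flat, mw_passes_eq]
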